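-- pv_equiv track=rewrite | github.com/mim-solutions/mim_nlp | mim_nlp/preprocessing/duplicates.py | _multiset
-- ===== SOURCE A (Python) =====
-- def _multiset(xs):
--     seen = {}
--     output = set()
--     for item in xs:
--         if item not in seen:
--             seen[item] = 0
--         else:
--             seen[item] += 1
--         output.add((item, seen[item]))
--     return output
-- ===== SOURCE B (Python) =====
-- def _multiset(xs):
--     # Phase 1: invert the list into item -> list of its positions (in order).
--     positions = {}
--     for i, x in enumerate(xs):
--         positions.setdefault(x, []).append(i)
--     # Phase 2: the occurrence index of position i is its rank in its item's position list.
--     return {(x, positions[x].index(i)) for i, x in enumerate(xs)}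
-- ===== Notes on version B (the rewrite author's own statement) =====
-- stated objective: alternative
-- what changed: Replaces A's single pass with a running per-item counter by a two-phase inversion: first group all positions by item into a dict of position lists, then derive each pair's occurrence index as the rank (list.index) of its position within its item's position list.
import Mathlib
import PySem

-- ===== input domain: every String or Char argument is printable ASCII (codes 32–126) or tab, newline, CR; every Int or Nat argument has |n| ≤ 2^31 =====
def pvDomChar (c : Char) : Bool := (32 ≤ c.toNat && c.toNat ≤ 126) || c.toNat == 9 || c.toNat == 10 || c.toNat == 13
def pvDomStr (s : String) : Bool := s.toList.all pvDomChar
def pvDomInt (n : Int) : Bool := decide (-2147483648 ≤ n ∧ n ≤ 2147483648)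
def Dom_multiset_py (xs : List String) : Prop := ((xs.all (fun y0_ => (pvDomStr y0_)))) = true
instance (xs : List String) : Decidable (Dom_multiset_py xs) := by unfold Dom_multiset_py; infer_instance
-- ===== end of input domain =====

-- B replaces A's one-pass running-counter loop by a two-phase inversion (group positions by
-- item, then rank each position inside its item's position list); objective: alternative.

-- ===== PORT A =====
def multiset_py (xs : List String) : List (String × Int) :=
  (xs.foldl
    (fun st item =>
      let seen :=
        if st.1.contains item then st.1.modify item 0 (· + 1)
        else st.1.insert item 0
      (seen, PySem.Set.add st.2 (item, seen.getD item 0)))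
    ((PySem.Dict.empty : PySem.Dict String Int), (PySem.Set.empty : PySem.Set (String × Int)))).2

-- ===== PORT B =====
-- positions[x].index(i) never raises in Source B (i is always in positions[xs[i]]), so the
-- total form (index? …).getD 0 is exact here.
def multiset_py_alt (xs : List String) : List (String × Int) :=
  let positions : PySem.Dict String (List Int) :=
    (PySem.List.enumerate xs).foldl
      (fun d p => d.modify p.2 [] (· ++ [p.1])) PySem.Dict.empty
  PySem.Set.ofList
    ((PySem.List.enumerate xs).map
      (fun p => (p.2, (((PySem.List.index? (positions.getD p.2 []) p.1).getD 0 : Nat) : Int))))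

-- ===== PRECONDITION & SPEC =====
def Spec_multiset_py (xs : List String) (out : List (String × Int)) : Prop := out = multiset_py_alt xs
instance (xs : List String) (out : List (String × Int)) : Decidable (Spec_multiset_py xs out) := by unfold Spec_multiset_py; infer_instance

-- ===== CLAIM (what is proved, stated in full; the proofs are below) =====
def Claim_equal_multiset_py : Prop := ∀ (xs : List String), Dom_multiset_py xs → Spec_multiset_py xs (multiset_py xs)

-- ===== LEMMAS AND PROOFS =====

-- canonical form: pairs (x, count of x in the prefix before it), in traversal order
def cgo : List String → List String → List (String × Int)
  | _, [] => []
  | pre, x :: ys => (x, (pre.count x : Int)) :: cgo (pre ++ [x]) ys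

lemma mem_cgo : ∀ (ys pre : List String) (k : String) (n : Int),
    (k, n) ∈ cgo pre ys ↔ (pre.count k : Int) ≤ n ∧ n < ((pre ++ ys).count k : Int) := by
  intro ys
  induction ys with
  | nil => intro pre k n; simp [cgo]
  | cons x ys ih =>
    intro pre k n
    simp only [cgo, List.mem_cons, ih, Prod.mk.injEq]
    have hc2 : (pre ++ x :: ys).count k = (pre ++ [x]).count k + ys.count k := by
      have h : pre ++ x :: ys = (pre ++ [x]) ++ ys := by simp
      rw [h, List.count_append]
    have hc3 : (pre ++ [x] ++ ys).count k = (pre ++ [x]).count k + ys.count k :=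
      List.count_append
    by_cases hk : x = k
    · subst hk
      have hc1 : (pre ++ [x]).count x = pre.count x + 1 := by
        simp [List.count_append]
      constructor
      · rintro (⟨-, rfl⟩ | ⟨h3, h4⟩) <;> constructor <;> omega
      · rintro ⟨h3, h4⟩
        by_cases hn : n = (pre.count x : Int)
        · left; exact ⟨rfl, hn⟩
        · right; constructor <;> omega
    · have hc1 : (pre ++ [x]).count k = pre.count k := by
        simp [List.count_append, hk]
      constructor
      · rintro (⟨rfl, rfl⟩ | ⟨h3, h4⟩)
        · exact absurd rfl hk
        · constructor <;> omega
      · rintro ⟨h3, h4⟩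
        right; constructor <;> omega

lemma nodup_cgo : ∀ (ys pre : List String), (cgo pre ys).Nodup := by
  intro ys
  induction ys with
  | nil => intro pre; simp [cgo]
  | cons x ys ih =>
    intro pre
    simp only [cgo, List.nodup_cons]
    refine ⟨fun hmem => ?_, ih _⟩
    rw [mem_cgo] at hmem
    have : (pre ++ [x]).count x = pre.count x + 1 := by
      simp [List.count_append]
    omega

lemma cgo_append : ∀ (ys pre : List String) (x : String),
    cgo pre (ys ++ [x]) = cgo pre ys ++ [(x, ((pre ++ ys).count x : Int))] := by
  intro ys
  induction ys with
  | nil => intro pre x; simp [cgo]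
  | cons y ys ih =>
    intro pre x
    simp only [List.cons_append, cgo, ih]
    simp [List.append_assoc]

lemma foldA : ∀ (ys pre : List String) (d : PySem.Dict String Int),
    (∀ k, d.contains k = decide (0 < pre.count k) ∧
          d.getD k 0 = (if 0 < pre.count k then (pre.count k : Int) - 1 else 0)) →
    (ys.foldl
      (fun st item =>
        let seen :=
          if st.1.contains item then st.1.modify item 0 (· + 1)
          else st.1.insert item 0
        (seen, PySem.Set.add st.2 (item, seen.getD item 0)))
      (d, cgo [] pre)).2 = cgo [] (pre ++ ys) := by
  intro ys
  induction ys with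
  | nil => intro pre d _; simp
  | cons x ys ih =>
    intro pre d hinv
    rw [List.foldl_cons]
    have hx := hinv x
    set seen := (if d.contains x then d.modify x 0 (· + 1) else d.insert x 0) with hseen
    have hval : seen.getD x 0 = (pre.count x : Int) := by
      by_cases hc : 0 < pre.count x
      · rw [hseen, hx.1, decide_eq_true hc, if_pos rfl, PySem.Dict.getD_modify_self,
          hx.2, if_pos hc]; ring
      · have h0 : pre.count x = 0 := by omega
        rw [hseen, hx.1]
        simp [PySem.Dict.getD_insert_self, h0]
    have hgetD : ∀ k, seen.getD k 0 =
        (if 0 < (pre ++ [x]).count k then ((pre ++ [x]).count k : Int) - 1 else 0) := by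
      intro k
      have hcnt : (pre ++ [x]).count k = pre.count k + if x = k then 1 else 0 := by
        simp [List.count_append, List.count_singleton, beq_iff_eq]
      by_cases hk : k = x
      · subst hk
        rw [hval, hcnt]
        simp
      · have : seen.getD k 0 = d.getD k 0 := by
          rw [hseen]
          by_cases hc : d.contains x
          · rw [if_pos hc, PySem.Dict.getD_modify]
            simp [hk]
          · rw [if_neg hc, PySem.Dict.getD_insert]
            simp [hk]
        rw [this, (hinv k).2, hcnt]
        simp [Ne.symm hk]
    have hcontains : ∀ k, seen.contains k = decide (0 < (pre ++ [x]).count k) := by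
      intro k
      have hcnt : (pre ++ [x]).count k = pre.count k + if x = k then 1 else 0 := by
        simp [List.count_append, List.count_singleton, beq_iff_eq]
      have hsc : seen.contains k = (k == x || d.contains k) := by
        rw [hseen]
        by_cases hc : d.contains x
        · rw [if_pos hc, PySem.Dict.contains_modify]
        · rw [if_neg hc, PySem.Dict.contains_insert]
      rw [hsc, (hinv k).1, hcnt]
      by_cases hk : k = x
      · subst hk; simp
      · simp [hk, Ne.symm hk]
    have hfresh : (x, (pre.count x : Int)) ∉ cgo [] pre := by
      rw [mem_cgo]
      simp
    have hadd : PySem.Set.add (cgo [] pre) (x, seen.getD x 0)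
        = cgo [] (pre ++ [x]) := by
      rw [hval, cgo_append]
      simp [PySem.Set.add, hfresh]
    have := ih (pre ++ [x]) seen (fun k => ⟨hcontains k, hgetD k⟩)
    simp only [List.append_assoc, List.singleton_append] at this
    simpa [hadd] using this

lemma multiset_py_eq_cgo (xs : List String) : multiset_py xs = cgo [] xs := by
  have := foldA xs [] PySem.Dict.empty (by intro k; simp [PySem.Dict.contains_empty, PySem.Dict.getD_empty])
  simpa [multiset_py, PySem.Set.empty, cgo] using this

lemma cgo_eq_enum : ∀ (ys pre : List String),
    cgo pre ys = (PySem.List.enumerate ys (pre.length : Int)).map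
      (fun p => (p.2, (((pre ++ ys).take p.1.toNat).count p.2 : Int))) := by
  intro ys
  induction ys with
  | nil => intro pre; simp [cgo, PySem.List.enumerate_nil]
  | cons x ys ih =>
    intro pre
    rw [cgo, PySem.List.enumerate_cons, List.map_cons]
    congr 1
    · simp [List.take_left']
    · rw [ih (pre ++ [x])]
      have hl : ((pre ++ [x]).length : Int) = (pre.length : Int) + 1 := by
        simp
      rw [hl]
      apply List.map_congr_left
      intro p hp
      rw [PySem.List.mem_enumerate_iff] at hp
      obtain ⟨k, hk, rfl⟩ := hp
      simp [List.append_assoc]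

-- B-side: the position list of x in the grouping dict, and ranking inside it
def posOf (ys : List String) (j : Int) (x : String) : List Int :=
  ((PySem.List.enumerate ys j).filter (fun p => p.2 == x)).map (·.1)

lemma posOf_cons (y : String) (ys : List String) (j : Int) (x : String) :
    posOf (y :: ys) j x = (if y = x then [j] else []) ++ posOf ys (j + 1) x := by
  simp only [posOf, PySem.List.enumerate_cons, List.filter_cons]
  by_cases h : y = x <;> simp [h]

lemma getD_posDict : ∀ (ys : List String) (j : Int) (d : PySem.Dict String (List Int)) (x : String),
    ((PySem.List.enumerate ys j).foldl
      (fun d p => d.modify p.2 [] (· ++ [p.1])) d).getD x []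
    = d.getD x [] ++ posOf ys j x := by
  intro ys
  induction ys with
  | nil => intro j d x; simp [PySem.List.enumerate_nil, posOf]
  | cons y ys ih =>
    intro j d x
    rw [PySem.List.enumerate_cons, List.foldl_cons, ih, posOf_cons]
    rw [PySem.Dict.getD_modify]
    by_cases h : x = y
    · subst h; simp
    · simp [h, Ne.symm h]

lemma index_posOf : ∀ (ys : List String) (j : Int) (k : Nat) (hk : k < ys.length),
    PySem.List.index? (posOf ys j ys[k]) (j + k) = some ((ys.take k).count ys[k]) := by
  intro ys
  induction ys with
  | nil => intro j k hk; simp at hk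
  | cons y ys ih =>
    intro j k hk
    match k with
    | 0 =>
      have hp : posOf (y :: ys) j y = j :: posOf ys (j + 1) y := by
        rw [posOf_cons, if_pos rfl]; rfl
      simp only [List.getElem_cons_zero, hp, Nat.cast_zero, add_zero]
      rw [PySem.List.index?_cons_self]
      simp
    | Nat.succ k =>
      have hk' : k < ys.length := by simpa using hk
      simp only [List.getElem_cons_succ]
      have hsh : j + (↑(k + 1) : Int) = (j + 1) + k := by push_cast; ring
      by_cases h : y = ys[k]
      · rw [posOf_cons, if_pos h, List.singleton_append, hsh,
          PySem.List.index?_cons_of_ne _ (by omega), ih (j + 1) k hk']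
        simp [h]
      · rw [posOf_cons, if_neg h, List.nil_append, hsh, ih (j + 1) k hk']
        simp [h]

lemma multiset_py_alt_eq_cgo (xs : List String) : multiset_py_alt xs = cgo [] xs := by
  have hL : (PySem.List.enumerate xs).map
      (fun p => (p.2, ((((PySem.List.enumerate xs).foldl
          (fun d p => d.modify p.2 [] (· ++ [p.1])) PySem.Dict.empty).getD p.2 []
          |> (PySem.List.index? · p.1) |>.getD 0 : Nat) : Int))) = cgo [] xs := by
    rw [cgo_eq_enum xs []]
    simp only [List.length_nil, Nat.cast_zero, List.nil_append]
    apply List.map_congr_left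
    intro p hp
    rw [PySem.List.mem_enumerate_iff] at hp
    obtain ⟨k, hk, rfl⟩ := hp
    have hd := getD_posDict xs 0 PySem.Dict.empty xs[k]
    simp only [PySem.Dict.getD_empty, List.nil_append] at hd
    simp only [hd, index_posOf xs 0 k hk, Option.getD_some]
    simp
  rw [multiset_py_alt]
  simp only at hL ⊢
  rw [hL]
  exact PySem.Set.ofList_eq_self_of_nodup _ (nodup_cgo xs [])

-- ===== VERDICT (by name: the statement is the Claim_ definition above) =====
theorem multiset_py_spec : Claim_equal_multiset_py := by
  intro xs _
  unfold Spec_multiset_py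
  rw [multiset_py_eq_cgo, multiset_py_alt_eq_cgo]
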